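-- pv_equiv track=rewrite | github.com/Gabrri/LOGICA2_CC | Tseytin.py | formaClausal
-- ===== SOURCE A (Python) =====
-- def Clausula(C):
--
--     L = []
--     while len(C) > 0:
--         s = C[0]
--         if s == "O":
--             C = C[1:]
--         elif s == "-":
--             literal = s + C[1]
--             L.append(literal)
--             C = C[2:]
--         else:
--             L.append(s)
--             C = C[1:]
--
--     return L
--
-- def formaClausal(A):
--
--     L = []
--     count = 0
--     while len(A) > 0:
--         if count >= len(A):
--             L.append(Clausula(A))
--             A = []
--         else:
--             if A[count] == "Y":
--                 L.append(Clausula(A[:count]))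
--                 A = A[count+1:]
--                 count = 0
--             else:
--                 count += 1
--
--     return L
-- ===== SOURCE B (Python) =====
-- def formaClausal(A):
--     # single linear pass: split on 'Y' and parse literals in one traversal, no slicing
--     result = []
--     clause = []
--     neg = False
--     for ch in A:
--         if neg:
--             clause.append('-' + ch)
--             neg = False
--         elif ch == 'Y':
--             result.append(clause)
--             clause = []
--         elif ch == '-':
--             neg = True
--         elif ch != 'O':
--             clause.append(ch)
--     if A and not A.endswith('Y'):
--         result.append(clause)
--     return result
-- ===== Notes on version B (the rewrite author's own statement) =====
-- stated objective: faster
-- what changed: Replaces the quadratic rescan-and-slice loops (an index scan that re-slices the string at every 'Y' plus a Clausula that repeatedly slices off the front) with one linear pass over the characters that splits on 'Y' and pairs '-' with the following character on the fly.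
-- outside the precondition, e.g. on formaClausal('-'): A raises IndexError, B returns [[]]
import Mathlib
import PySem

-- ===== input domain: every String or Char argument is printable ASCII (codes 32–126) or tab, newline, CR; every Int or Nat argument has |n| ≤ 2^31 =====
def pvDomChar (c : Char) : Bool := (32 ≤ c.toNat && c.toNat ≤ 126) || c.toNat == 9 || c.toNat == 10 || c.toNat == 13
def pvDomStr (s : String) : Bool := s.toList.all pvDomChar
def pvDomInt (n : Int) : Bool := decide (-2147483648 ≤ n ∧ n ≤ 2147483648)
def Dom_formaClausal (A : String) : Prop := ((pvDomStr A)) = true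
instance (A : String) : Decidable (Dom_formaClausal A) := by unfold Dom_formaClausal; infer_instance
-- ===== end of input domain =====

-- B replaces A's quadratic rescan-and-slice loops with one linear pass (faster, measured).

-- ===== PORT A =====
-- Clausula: while loop slicing the front off C; ported as structural recursion on the char list.
def clausulaA : List Char → List String
  | [] => []
  | s :: rest =>
    if s = 'O' then clausulaA rest
    else if s = '-' then
      match rest with
      | [] => []                       -- Python: C[1] raises IndexError here; excluded by Pre_
      | c :: rest2 => String.mk [s, c] :: clausulaA rest2
    else String.mk [s] :: clausulaA rest

-- formaClausal's while loop over (A, count, L); A[:count] / A[count+1:] are take/drop (count ≥ 0).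
def formaClausalLoop (A : List Char) (count : Nat) (L : List (List String)) : List (List String) :=
  if h : 0 < A.length then
    if hc : count ≥ A.length then
      formaClausalLoop [] 0 (L ++ [clausulaA A])
    else
      if A[count]'(by omega) = 'Y' then
        formaClausalLoop (A.drop (count + 1)) 0 (L ++ [clausulaA (A.take count)])
      else
        formaClausalLoop A (count + 1) L
  else L
termination_by (A.length, A.length - count)
decreasing_by
  · simp only [List.length_nil]; exact Prod.Lex.left _ _ h
  · exact Prod.Lex.left _ _ (by simp [List.length_drop]; omega)
  · exact Prod.Lex.right _ (by omega)

def formaClausal (A : String) : List (List String) := formaClausalLoop A.toList 0 []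

-- ===== PORT B =====
-- one step of Source B's for-loop; state = (result, clause, neg)
def altStep (st : List (List String) × List String × Bool) (ch : Char) :
    List (List String) × List String × Bool :=
  if st.2.2 then (st.1, st.2.1 ++ [String.mk ['-', ch]], false)
  else if ch = 'Y' then (st.1 ++ [st.2.1], [], false)
  else if ch = '-' then (st.1, st.2.1, true)
  else if ch ≠ 'O' then (st.1, st.2.1 ++ [String.mk [ch]], false)
  else (st.1, st.2.1, false)

def formaClausal_alt (A : String) : List (List String) :=
  let cs := A.toList
  let st := cs.foldl altStep ([], [], false)
  -- `if A and not A.endswith('Y')` — exact: A nonempty and its last character is not 'Y'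
  if cs ≠ [] ∧ cs.getLast? ≠ some 'Y' then st.1 ++ [st.2.1] else st.1

-- ===== PRECONDITION & SPEC =====
-- length of the trailing run of '-' of a chunk
def tdRun (cs : List Char) : Nat := (cs.reverse.takeWhile (· == '-')).length

-- Pre_ excludes exactly the inputs where Python A raises IndexError: some 'Y'-separated
-- chunk ends in a dangling '-' (odd-length trailing run of '-').
def Pre_formaClausal (A : String) : Prop :=
  ∀ seg ∈ A.toList.splitOn 'Y', tdRun seg % 2 = 0
instance (A : String) : Decidable (Pre_formaClausal A) := by unfold Pre_formaClausal; infer_instance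

def pvWitness_formaClausal : String := "pO-qYrY-st"

def Spec_formaClausal (A : String) (out : List (List String)) : Prop := out = formaClausal_alt A
instance (A : String) (out : List (List String)) : Decidable (Spec_formaClausal A out) := by
  unfold Spec_formaClausal; infer_instance

-- ===== CLAIM =====
def Claim_equal_formaClausal : Prop :=
  ∀ (A : String), Dom_formaClausal A → Pre_formaClausal A → Spec_formaClausal A (formaClausal A)

-- ===== LEMMAS AND PROOFS =====

-- the 'Y'-chunks of the input, trailing empty chunk dropped (the shape both loops produce)
def segs (cs : List Char) : List (List Char) :=
  if h : cs = [] then [] else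
    let pre := cs.takeWhile (· != 'Y')
    if pre.length = cs.length then [cs]
    else pre :: segs (cs.drop (pre.length + 1))
termination_by cs.length
decreasing_by
  simp only [List.length_drop]
  have : 0 < cs.length := List.length_pos_iff.mpr h
  omega

lemma segs_nil : segs [] = [] := by rw [segs]; simp
lemma segs_full (cs : List Char) (h0 : cs ≠ [])
    (h : (cs.takeWhile (· != 'Y')).length = cs.length) : segs cs = [cs] := by
  rw [segs]; simp [h0, h]
lemma segs_step (cs : List Char) (h0 : cs ≠ [])
    (h : (cs.takeWhile (· != 'Y')).length ≠ cs.length) :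
    segs cs = cs.takeWhile (· != 'Y') ::
      segs (cs.drop ((cs.takeWhile (· != 'Y')).length + 1)) := by
  rw [segs]; simp [h0, h]

-- ---- takeWhile facts ----
lemma tw_getElem {p : Char → Bool} (cs : List Char) (i : Nat)
    (h : i < (cs.takeWhile p).length) (h' : i < cs.length) : p (cs[i]'h') = true := by
  induction cs generalizing i with
  | nil => simp at h'
  | cons c t ih =>
    by_cases hp : p c
    · cases i with
      | zero => simpa [hp]
      | succ j =>
        simp only [List.takeWhile_cons, hp, if_true, List.length_cons] at h
        simpa using ih j (by omega) (by simpa using h')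
    · simp [List.takeWhile_cons, hp] at h
lemma tw_fail {p : Char → Bool} (cs : List Char)
    (h : (cs.takeWhile p).length < cs.length) :
    p (cs[(cs.takeWhile p).length]'h) = false := by
  induction cs with
  | nil => simp at h
  | cons c t ih =>
    by_cases hp : p c
    · simp only [List.takeWhile_cons, hp, if_true, List.length_cons] at h ⊢
      simpa using ih (by omega)
    · simpa [List.takeWhile_cons, hp] using (by simpa [hp] : p c = false)
lemma tw_eq_take {p : Char → Bool} (cs : List Char) :
    cs.takeWhile p = cs.take (cs.takeWhile p).length :=
  List.prefix_iff_eq_take.mp (List.takeWhile_prefix p)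

-- decomposition at the first 'Y'
lemma decomp (cs : List Char) (h : (cs.takeWhile (· != 'Y')).length < cs.length) :
    cs = cs.takeWhile (· != 'Y') ++ 'Y' :: cs.drop ((cs.takeWhile (· != 'Y')).length + 1) := by
  have hfail := tw_fail (p := (· != 'Y')) cs h
  have hY : cs[(cs.takeWhile (· != 'Y')).length]'h = 'Y' := by
    simpa using hfail
  conv_lhs => rw [← List.take_append_drop ((cs.takeWhile (· != 'Y')).length) cs]
  rw [← tw_eq_take]
  congr 1
  rw [List.drop_eq_getElem_cons h, hY]

-- splitOn unfolds along the first 'Y'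
lemma splitOn_unfold (cs : List Char) :
    cs.splitOn 'Y' =
      cs.takeWhile (· != 'Y') ::
        (if (cs.takeWhile (· != 'Y')).length = cs.length then []
         else (cs.drop ((cs.takeWhile (· != 'Y')).length + 1)).splitOn 'Y') := by
  induction cs with
  | nil => simp [List.splitOn, List.splitOnP_nil]
  | cons c t ih =>
    show List.splitOnP _ _ = _
    rw [List.splitOnP_cons]
    by_cases hc : c = 'Y'
    · subst hc; simp [List.splitOn]
    · have hc' : (c == 'Y') = false := by simpa using hc
      have hcne : (c != 'Y') = true := by simpa using hc
      have hlen := (List.takeWhile_sublist (l := t) (· != 'Y')).length_le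
      rw [hc',
        show List.splitOnP (· == 'Y') t = t.splitOn 'Y' from rfl, ih]
      by_cases h1 : (t.takeWhile (· != 'Y')).length = t.length
      · simp [hcne, h1, List.modifyHead]
      · simp only [Bool.false_eq_true, if_false, List.modifyHead, List.takeWhile_cons, hcne,
          if_true, List.length_cons, if_neg h1,
          if_neg (by omega : ¬ (t.takeWhile (· != 'Y')).length + 1 = t.length + 1),
          List.drop_succ_cons]

-- ---- tdRun facts ----
lemma tdRun_le (cs : List Char) : tdRun cs ≤ cs.length := by
  have := (List.takeWhile_sublist (l := cs.reverse) (· == '-')).length_le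
  simpa [tdRun] using this
lemma tdRun_cons_ne (c : Char) (t : List Char) (hc : c ≠ '-') : tdRun (c :: t) = tdRun t := by
  have hc' : (c == '-') = false := by simpa using hc
  simp only [tdRun, List.reverse_cons, List.takeWhile_append]
  split_ifs with h
  · simp only [List.length_reverse] at h
    simp [hc', h]
  · rfl
lemma tdRun_cons_dash (t : List Char) :
    tdRun ('-' :: t) = if tdRun t = t.length then t.length + 1 else tdRun t := by
  simp only [tdRun, List.reverse_cons, List.takeWhile_append, List.length_reverse]
  split_ifs with h h2 h3 <;> simp_all <;> omega
lemma tdRun_parity (c : Char) (t : List Char) : tdRun ('-' :: c :: t) % 2 = tdRun t % 2 := by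
  have hle := tdRun_le t
  by_cases hc : c = '-'
  · subst hc
    rw [tdRun_cons_dash, tdRun_cons_dash]
    split_ifs with h1 h2 h3 <;> simp_all <;> omega
  · rw [tdRun_cons_dash, tdRun_cons_ne c t hc]
    split_ifs with h1
    · simp only [List.length_cons] at h1; omega
    · rfl

-- ---- A's loop computes (segs cs).map clausulaA ----
lemma loopA_eq (cs : List Char) (count : Nat) (L : List (List String)) :
    count ≤ (cs.takeWhile (· != 'Y')).length →
    formaClausalLoop cs count L = L ++ (segs cs).map clausulaA := by
  fun_induction formaClausalLoop cs count L with
  | case1 cs count L h hc ih =>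
    intro hinv
    have hlen := (List.takeWhile_sublist (l := cs) (· != 'Y')).length_le
    have hfull : (cs.takeWhile (· != 'Y')).length = cs.length := by omega
    rw [ih (by simp)]
    rw [segs_full cs (by intro hcs; simp [hcs] at h) hfull]
    simp [segs_nil]
  | case2 cs count L h hc hY ih =>
    intro hinv
    have hc' : count < cs.length := by omega
    have heq : (cs.takeWhile (· != 'Y')).length = count := by
      by_contra hne
      have hlt : count < (cs.takeWhile (· != 'Y')).length := by omega
      have := tw_getElem (p := (· != 'Y')) cs count hlt hc'
      simp [hY] at this
    have htake : cs.take count = cs.takeWhile (· != 'Y') := by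
      rw [tw_eq_take (p := (· != 'Y')) cs, heq]
    rw [ih (by simp)]
    rw [segs_step cs (by intro hcs; simp [hcs] at h) (by omega)]
    simp [heq, htake, List.append_assoc]
  | case3 cs count L h hc hY ih =>
    intro hinv
    have hc' : count < cs.length := by omega
    apply ih
    rcases Nat.lt_or_ge count (cs.takeWhile (· != 'Y')).length with hlt | hge
    · omega
    · exfalso
      have heq : (cs.takeWhile (· != 'Y')).length = count := by omega
      have hfl : (cs.takeWhile (· != 'Y')).length < cs.length := by omega
      have := tw_fail (p := (· != 'Y')) cs hfl
      simp only [heq] at this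
      simp [hY] at this
  | case4 cs count L h =>
    intro _
    have : cs = [] := by
      cases cs with | nil => rfl | cons a t => simp at h
    subst this
    simp [segs_nil]

-- ---- B's fold: result prefix is inert ----
lemma fold_prefix (cs : List Char) (r0 r : List (List String)) (c : List String) (n : Bool) :
    cs.foldl altStep (r0 ++ r, c, n) =
      ((r0 ++ (cs.foldl altStep (r, c, n)).1, (cs.foldl altStep (r, c, n)).2)) := by
  induction cs generalizing r c n with
  | nil => rfl
  | cons ch t ih =>
    simp only [List.foldl_cons, altStep]
    split_ifs <;> simp [ih, List.append_assoc]

-- ---- B's fold across one 'Y'-free chunk with even trailing dash run ----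
lemma fold_chunk (seg : List Char) (hY : 'Y' ∉ seg) (hrun : tdRun seg % 2 = 0)
    (rest : List Char) (res : List (List String)) (clause : List String) :
    (seg ++ rest).foldl altStep (res, clause, false) =
      rest.foldl altStep (res, clause ++ clausulaA seg, false) := by
  induction hn : seg.length using Nat.strong_induction_on generalizing seg rest res clause with
  | _ n ih =>
  subst hn
  cases seg with
  | nil => simp [clausulaA]
  | cons c t =>
    have hcY : c ≠ 'Y' := by intro hcv; exact hY (by simp [hcv])
    have htY : 'Y' ∉ t := fun hm => hY (List.mem_cons_of_mem _ hm)
    by_cases hd : c = '-'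
    · subst hd
      cases t with
      | nil => exact absurd hrun (by decide)
      | cons c2 t2 =>
        have ht2Y : 'Y' ∉ t2 := fun hm => htY (List.mem_cons_of_mem _ hm)
        have hrun2 : tdRun t2 % 2 = 0 := by rw [← tdRun_parity c2 t2]; exact hrun
        simp only [List.cons_append, List.foldl_cons]
        rw [show altStep (res, clause, false) '-' = (res, clause, true) by simp [altStep],
          show altStep (res, clause, true) c2 =
            (res, clause ++ [String.mk ['-', c2]], false) by simp [altStep]]
        rw [ih t2.length (by simp) t2 ht2Y hrun2 rest res (clause ++ [String.mk ['-', c2]]) rfl]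
        rw [show clausulaA ('-' :: c2 :: t2) = String.mk ['-', c2] :: clausulaA t2 by
          rw [clausulaA.eq_def]; simp]
        simp [List.append_assoc]
    · have hrunt : tdRun t % 2 = 0 := by rw [← tdRun_cons_ne c t hd]; exact hrun
      by_cases hO : c = 'O'
      · subst hO
        simp only [List.cons_append, List.foldl_cons]
        rw [show altStep (res, clause, false) 'O' = (res, clause, false) by simp [altStep]]
        rw [ih t.length (by simp) t htY hrunt rest res clause rfl]
        rw [show clausulaA ('O' :: t) = clausulaA t by rw [clausulaA.eq_def]; simp]
      · simp only [List.cons_append, List.foldl_cons]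
        rw [show altStep (res, clause, false) c =
            (res, clause ++ [String.mk [c]], false) by simp [altStep, hcY, hd, hO]]
        rw [ih t.length (by simp) t htY hrunt rest res (clause ++ [String.mk [c]]) rfl]
        rw [show clausulaA (c :: t) = String.mk [c] :: clausulaA t by rw [clausulaA.eq_def]; simp [hO, hd]]
        simp [List.append_assoc]

-- ---- B's finished fold computes (segs cs).map clausulaA under Pre_ ----
lemma alt_eq (cs : List Char) :
    (∀ seg ∈ cs.splitOn 'Y', tdRun seg % 2 = 0) →
    (if cs ≠ [] ∧ cs.getLast? ≠ some 'Y' then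
       (cs.foldl altStep ([], [], false)).1 ++ [(cs.foldl altStep ([], [], false)).2.1]
     else (cs.foldl altStep ([], [], false)).1) = (segs cs).map clausulaA := by
  induction hn : cs.length using Nat.strong_induction_on generalizing cs with
  | _ n ih =>
  subst hn
  intro hpre
  by_cases h0 : cs = []
  · subst h0; simp [segs_nil]
  · have hYpre : 'Y' ∉ cs.takeWhile (· != 'Y') := by
      intro hm
      have := List.mem_takeWhile_imp hm
      simp at this
    have hpre0 : tdRun (cs.takeWhile (· != 'Y')) % 2 = 0 := by
      apply hpre
      rw [splitOn_unfold]
      exact List.mem_cons_self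
    have hlen := (List.takeWhile_sublist (l := cs) (· != 'Y')).length_le
    by_cases hfull : (cs.takeWhile (· != 'Y')).length = cs.length
    · have htw : cs.takeWhile (· != 'Y') = cs := by
        rw [tw_eq_take (p := (· != 'Y')) cs, hfull, List.take_length]
      have hlast : cs.getLast? ≠ some 'Y' := by
        intro hsome
        have hmem : 'Y' ∈ cs := by
          cases hcs : cs.getLast? with
          | none => rw [hcs] at hsome; simp at hsome
          | some x =>
            rw [hcs] at hsome
            obtain rfl : x = 'Y' := by simpa using hsome
            exact List.mem_of_getLast? hcs
        rw [← htw] at hmem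
        exact hYpre hmem
      rw [if_pos ⟨h0, hlast⟩]
      have := fold_chunk cs (htw ▸ hYpre) (by rwa [htw] at hpre0) [] [] []
      simp only [List.append_nil, List.nil_append] at this
      rw [this]
      rw [segs_full cs h0 hfull]
      simp
    · have hflt : (cs.takeWhile (· != 'Y')).length < cs.length := by omega
      have hdec := decomp cs hflt
      set pre := cs.takeWhile (· != 'Y') with hpredef
      set rst := cs.drop (pre.length + 1) with hrstdef
      have hsplit : cs.splitOn 'Y' = pre :: rst.splitOn 'Y' := by
        rw [splitOn_unfold, if_neg hfull]
      have hprerst : ∀ seg ∈ rst.splitOn 'Y', tdRun seg % 2 = 0 := by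
        intro seg hm
        exact hpre seg (by rw [hsplit]; exact List.mem_cons_of_mem _ hm)
      have hfold : cs.foldl altStep ([], [], false) =
          ([clausulaA pre] ++ (rst.foldl altStep ([], [], false)).1,
            (rst.foldl altStep ([], [], false)).2) := by
        conv_lhs => rw [hdec]
        rw [fold_chunk pre hYpre hpre0 ('Y' :: rst) [] []]
        simp only [List.nil_append, List.foldl_cons]
        rw [show altStep ([], clausulaA pre, false) 'Y' =
            ([clausulaA pre], [], false) by simp [altStep]]
        have := fold_prefix rst [clausulaA pre] [] [] false
        simpa using this
      have hlens : cs.length = pre.length + 1 + rst.length := by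
        conv_lhs => rw [hdec]
        simp [List.length_append]
        omega
      have hrec := ih rst.length (by omega) rst rfl hprerst
      rw [segs_step cs h0 hfull, ← hpredef, ← hrstdef]
      cases hrst : rst with
      | nil =>
        have hlast : cs.getLast? = some 'Y' := by
          conv_lhs => rw [hdec]
          rw [hrst]
          exact List.getLast?_concat
        rw [if_neg (by simp [hlast])]
        rw [hfold, hrst]
        simp [segs_nil]
      | cons r rt =>
        have hlast : cs.getLast? = rst.getLast? := by
          conv_lhs => rw [hdec]
          rw [List.getLast?_append, hrst]
          cases hrl : (r :: rt).getLast? with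
          | none => simp at hrl
          | some x => simp [List.getLast?_cons, hrl]
        have hrstne : rst ≠ [] := by rw [hrst]; simp
        rw [hfold]
        by_cases hY2 : rst.getLast? = some 'Y'
        · rw [if_neg (by simp [hlast, hY2])]
          rw [if_neg (by simp [hY2])] at hrec
          rw [← hrst]
          simp [hrec]
        · rw [if_pos ⟨h0, by simp [hlast, hY2]⟩]
          rw [if_pos ⟨hrstne, hY2⟩] at hrec
          rw [← hrst]
          simp only [List.map_cons]
          rw [← hrec]
          simp [List.append_assoc]

-- ===== VERDICT =====
theorem formaClausal_spec : Claim_equal_formaClausal := by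
  intro A _ hpre
  unfold Spec_formaClausal formaClausal formaClausal_alt
  rw [loopA_eq A.toList 0 [] (Nat.zero_le _), alt_eq A.toList hpre]
  simp
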